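-- pv_equiv track=rewrite | github.com/Wizzerinus/advent-of-code-2023 | k.py | count_prefix_sums
-- ===== SOURCE A (Python) =====
-- def count_prefix_sums(count, items):
-- 	ans = []
-- 	j = 0
-- 	for i in range(count):
-- 		while j < len(items) and items[j] < i:
-- 			j = j + 1
-- 		ans.append(j)
-- 	return ans
-- ===== SOURCE B (Python) =====
-- def count_prefix_sums(count, items):
--     # prefix-maximum table + binary search per query
--     P = []
--     for x in items:
--         P.append(x if not P else max(P[-1], x))
--     ans = []
--     for i in range(count):
--         lo, hi = 0, len(P)
--         while lo < hi:
--             mid = (lo + hi) // 2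
--             if P[mid] < i:
--                 lo = mid + 1
--             else:
--                 hi = mid
--         ans.append(lo)
--     return ans
-- ===== Notes on version B (the rewrite author's own statement) =====
-- stated objective: alternative
-- what changed: Replaced A's coupled two-pointer sweep (a resumable while-loop advancing j across queries) with a precomputed prefix-maximum table queried independently per i by binary search.
import Mathlib
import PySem

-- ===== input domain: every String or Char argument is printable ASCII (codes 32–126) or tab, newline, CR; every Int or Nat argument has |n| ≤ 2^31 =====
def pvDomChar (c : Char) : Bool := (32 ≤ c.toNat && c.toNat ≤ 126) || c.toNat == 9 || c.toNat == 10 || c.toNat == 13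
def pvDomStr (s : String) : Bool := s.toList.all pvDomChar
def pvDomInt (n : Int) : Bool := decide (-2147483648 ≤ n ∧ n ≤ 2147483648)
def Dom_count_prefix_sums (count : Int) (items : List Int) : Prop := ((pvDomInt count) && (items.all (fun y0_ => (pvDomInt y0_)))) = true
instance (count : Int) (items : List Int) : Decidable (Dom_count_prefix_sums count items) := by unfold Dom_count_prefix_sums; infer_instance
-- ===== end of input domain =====

-- B replaces A's coupled two-pointer sweep by a prefix-maximum table queried
-- independently per i with a hand-written binary search (objective: alternative).

-- ===== PORT A =====
-- the inner `while j < len(items) and items[j] < i: j = j + 1` loop;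
-- `fuel` only makes the recursion structural (callers pass items.length - j,
-- an upper bound on the remaining iterations), and getD is exact here:
-- the guard ensures j < items.length before the access
def whileA (items : List Int) (i : Int) : Nat → Nat → Nat
  | 0, j => j
  | fuel + 1, j =>
    if j < items.length ∧ items.getD j 0 < i then whileA items i fuel (j + 1) else j

-- one iteration of A's `for i in range(count)` body over the state (ans, j)
def stepA (items : List Int) (st : List Int × Nat) (i : Int) : List Int × Nat :=
  let j := whileA items i (items.length - st.2) st.2
  (st.1 ++ [(j : Int)], j)

def count_prefix_sums (count : Int) (items : List Int) : List Int :=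
  ((PySem.List.pyRange 0 count 1).foldl (stepA items) ([], 0)).1

-- ===== PORT B =====
-- `P.append(x if not P else max(P[-1], x))`: running maximum carried as an Option
def pmaxB : List Int → Option Int → List Int
  | [], _ => []
  | x :: xs, none => x :: pmaxB xs (some x)
  | x :: xs, some m => (max m x) :: pmaxB xs (some (max m x))

-- the hand-written `while lo < hi` binary-search loop of Source B; `fuel` only
-- makes the recursion structural (callers pass P.length ≥ hi - lo, an upper
-- bound on the remaining iterations)
def bsearch (P : List Int) (x : Int) : Nat → Nat → Nat → Nat
  | 0, lo, _ => lo
  | fuel + 1, lo, hi =>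
    if lo < hi then
      let mid := (lo + hi) / 2
      if P.getD mid 0 < x then bsearch P x fuel (mid + 1) hi else bsearch P x fuel lo mid
    else lo

def count_prefix_sums_alt (count : Int) (items : List Int) : List Int :=
  let P := pmaxB items none
  (PySem.List.pyRange 0 count 1).map (fun i => ((bsearch P i P.length 0 P.length : Nat) : Int))

-- ===== PRECONDITION & SPEC =====
def Spec_count_prefix_sums (count : Int) (items : List Int) (out : List Int) : Prop := out = count_prefix_sums_alt count items
instance (count : Int) (items : List Int) (out : List Int) : Decidable (Spec_count_prefix_sums count items out) := by unfold Spec_count_prefix_sums; infer_instance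

-- ===== CLAIM (what is proved, stated in full; the proofs are below) =====
def Claim_equal_count_prefix_sums : Prop := ∀ (count : Int) (items : List Int), Dom_count_prefix_sums count items → Spec_count_prefix_sums count items (count_prefix_sums count items)

-- ===== LEMMAS AND PROOFS =====

-- M items k = max(items[0..k]), the k-th prefix maximum
def M (items : List Int) (k : Nat) : Int := (items.take (k + 1)).foldl max (items.getD 0 0)

-- reference loop: like whileA but testing the prefix maximum instead of items[j]
def fge (items : List Int) (i : Int) (j : Nat) : Nat :=
  if h : j < items.length ∧ M items j < i then fge items i (j + 1) else j
termination_by items.length - j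
decreasing_by omega

theorem pmaxB_length (xs : List Int) : ∀ acc, (pmaxB xs acc).length = xs.length := by
  induction xs with
  | nil => intro acc; cases acc <;> rfl
  | cons x t ih => intro acc; cases acc <;> simp [pmaxB, ih]

theorem pmaxB_getD (xs : List Int) : ∀ (m : Int) (k : Nat), k < xs.length →
    (pmaxB xs (some m)).getD k 0 = (xs.take (k + 1)).foldl max m := by
  induction xs with
  | nil => intro m k h; simp at h
  | cons x t ih =>
    intro m k h
    cases k with
    | zero => simp [pmaxB]
    | succ k =>
      simp only [pmaxB, List.getD_cons_succ, List.take_succ_cons, List.foldl_cons]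
      exact ih (max m x) k (by simpa using h)

theorem P_eq_M (items : List Int) (k : Nat) (h : k < items.length) :
    (pmaxB items none).getD k 0 = M items k := by
  cases items with
  | nil => simp at h
  | cons x t =>
    cases k with
    | zero => simp [pmaxB, M]
    | succ k =>
      simp only [pmaxB, List.getD_cons_succ, M, List.take_succ_cons, List.foldl_cons,
        List.getD_cons_zero, max_self]
      exact pmaxB_getD t x k (by simpa using h)

theorem M_zero (items : List Int) (h : 0 < items.length) : M items 0 = items.getD 0 0 := by
  cases items with
  | nil => simp at h
  | cons x t => simp [M]

theorem M_succ (items : List Int) (k : Nat) (h : k + 1 < items.length) :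
    M items (k + 1) = max (M items k) (items.getD (k + 1) 0) := by
  unfold M
  rw [List.take_add_one, List.foldl_append]
  have : items[k + 1]? = some (items.getD (k + 1) 0) := by
    rw [List.getD_eq_getElem?_getD, List.getElem?_eq_getElem h]; simp
  rw [this]
  simp

theorem M_mono (items : List Int) (k k' : Nat) (hkk : k ≤ k') (h : k' < items.length) :
    M items k ≤ M items k' := by
  induction k' with
  | zero => simp [Nat.le_zero.mp hkk]
  | succ k' ih =>
    rcases Nat.lt_or_ge k (k' + 1) with hlt | hge
    · have : M items k ≤ M items k' := ih (by omega) (by omega)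
      rw [M_succ items k' h]
      exact le_trans this (le_max_left _ _)
    · have : k = k' + 1 := by omega
      simp [this]

theorem item_le_M (items : List Int) (k : Nat) (h : k < items.length) :
    items.getD k 0 ≤ M items k := by
  cases k with
  | zero => rw [M_zero items h]
  | succ k => rw [M_succ items k h]; exact le_max_right _ _

-- under the invariant “all prefix maxima before j are < i”, testing items[j] and
-- testing M j agree, so A's while-loop and the reference loop run in lockstep
theorem lockstep (items : List Int) (i : Int) :
    ∀ (fuel j : Nat), items.length - j ≤ fuel → (∀ k, k < j → M items k < i) →
    whileA items i fuel j = fge items i j := by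
  intro fuel
  induction fuel with
  | zero =>
    intro j hd hH
    have hj : ¬ j < items.length := by omega
    rw [whileA, fge, dif_neg (fun h => hj h.1)]
  | succ fuel ih =>
    intro j hd hH
    rw [whileA, fge]
    by_cases hj : j < items.length
    · have hiff : items.getD j 0 < i ↔ M items j < i := by
        constructor
        · intro hx
          cases j with
          | zero => rwa [M_zero items hj]
          | succ j =>
            rw [M_succ items j hj]
            exact max_lt (hH j (by omega)) hx
        · intro hm
          exact lt_of_le_of_lt (item_le_M items j hj) hm
      by_cases hx : M items j < i
      · rw [if_pos ⟨hj, hiff.mpr hx⟩, dif_pos ⟨hj, hx⟩]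
        refine ih (j + 1) (by omega) ?_
        intro k hk
        rcases Nat.lt_or_ge k j with h1 | h1
        · exact hH k h1
        · have hkj : k = j := by omega
          rw [hkj]; exact hx
      · rw [if_neg (fun h => hx (hiff.mp h.2)), dif_neg (fun h => hx h.2)]
    · rw [if_neg (fun h => hj h.1), dif_neg (fun h => hj h.1)]

theorem fge_props (items : List Int) (i : Int) :
    ∀ (d j : Nat), items.length - j ≤ d → j ≤ items.length →
    (j ≤ fge items i j ∧ fge items i j ≤ items.length ∧
     (∀ k, j ≤ k → k < fge items i j → M items k < i) ∧
     (fge items i j < items.length → ¬ M items (fge items i j) < i)) := by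
  intro d
  induction d with
  | zero =>
    intro j hd hjle
    have hj : ¬ j < items.length := by omega
    rw [fge, dif_neg (fun h => hj h.1)]
    exact ⟨le_refl _, hjle,
      fun k h1 h2 => absurd h2 (by omega),
      fun h => absurd h hj⟩
  | succ d ih =>
    intro j hd hjle
    rw [fge]
    by_cases hc : j < items.length ∧ M items j < i
    · rw [dif_pos hc]
      obtain ⟨h1, h2, h3, h4⟩ := ih (j + 1) (by omega) (by omega)
      refine ⟨by omega, h2, ?_, h4⟩
      intro k hk1 hk2
      rcases Nat.lt_or_ge k (j + 1) with h | h
      · have hkj : k = j := by omega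
        rw [hkj]; exact hc.2
      · exact h3 k h hk2
    · rw [dif_neg hc]
      exact ⟨le_refl _, hjle,
        fun k h1 h2 => absurd h2 (by omega),
        fun hlt hm => hc ⟨hlt, hm⟩⟩

-- the characterisation (≤ n, all before it < i, not < i at it) is unique
theorem char_unique (items : List Int) (i : Int) (r1 r2 : Nat)
    (h1 : r1 ≤ items.length) (h2 : ∀ k, k < r1 → M items k < i)
    (h3 : r1 < items.length → ¬ M items r1 < i)
    (h1' : r2 ≤ items.length) (h2' : ∀ k, k < r2 → M items k < i)
    (h3' : r2 < items.length → ¬ M items r2 < i) : r1 = r2 := by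
  rcases Nat.lt_trichotomy r1 r2 with h | h | h
  · exact absurd (h2' r1 h) (h3 (by omega))
  · exact h
  · exact absurd (h2 r2 h) (h3' (by omega))

theorem fge_eq_zero (items : List Int) (i : Int) (j : Nat) (hj : j ≤ items.length)
    (hH : ∀ k, k < j → M items k < i) : fge items i j = fge items i 0 := by
  obtain ⟨a1, a2, a3, a4⟩ := fge_props items i (items.length - j) j (le_refl _) hj
  obtain ⟨b1, b2, b3, b4⟩ := fge_props items i items.length 0 (by omega) (by omega)
  refine char_unique items i _ _ a2 ?_ a4 b2 (fun k hk => b3 k (by omega) hk) b4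
  intro k hk
  rcases Nat.lt_or_ge k j with h | h
  · exact hH k h
  · exact a3 k h hk

theorem bsearch_correct (items : List Int) (i : Int) :
    ∀ (fuel lo hi : Nat), hi - lo ≤ fuel → lo ≤ fge items i 0 → fge items i 0 ≤ hi →
    hi ≤ items.length → bsearch (pmaxB items none) i fuel lo hi = fge items i 0 := by
  intro fuel
  induction fuel with
  | zero =>
    intro lo hi hd hlo hhi hn
    rw [bsearch]
    omega
  | succ fuel ih =>
    intro lo hi hd hlo hhi hn
    rw [bsearch]
    by_cases hc : lo < hi
    · simp only [hc, if_true]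
      obtain ⟨b1, b2, b3, b4⟩ := fge_props items i items.length 0 (by omega) (by omega)
      have hmid : (lo + hi) / 2 < items.length := by omega
      rw [P_eq_M items _ hmid]
      by_cases hm : M items ((lo + hi) / 2) < i
      · simp only [hm, if_true]
        have hg : (lo + hi) / 2 < fge items i 0 := by
          by_contra hle
          have hle : fge items i 0 ≤ (lo + hi) / 2 := Nat.le_of_not_lt hle
          have hfn : fge items i 0 < items.length := by omega
          exact (b4 hfn) (lt_of_le_of_lt (M_mono items _ _ hle hmid) hm)
        exact ih ((lo + hi) / 2 + 1) hi (by omega) (by omega) hhi hn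
      · simp only [hm, if_false]
        have hg : fge items i 0 ≤ (lo + hi) / 2 := by
          by_contra hgt
          exact hm (b3 _ (by omega) (Nat.lt_of_not_le hgt))
        exact ih lo ((lo + hi) / 2) (by omega) hlo hg (by omega)
    · simp only [hc, if_false]
      omega

theorem foldA (items : List Int) (b : Int) :
    ∀ (d : Nat) (a : Int) (j : Nat) (ans : List Int), (b - a).toNat ≤ d →
    j ≤ items.length → (∀ k, k < j → M items k < a) →
    ((PySem.List.pyRange a b 1).foldl (stepA items) (ans, j)).1 =
      ans ++ (PySem.List.pyRange a b 1).map (fun i => ((fge items i 0 : Nat) : Int)) := by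
  intro d
  induction d with
  | zero =>
    intro a j ans hd hj hH
    rw [PySem.List.pyRange_one_eq_nil (by omega)]
    simp
  | succ d ih =>
    intro a j ans hd hj hH
    by_cases hab : a < b
    · rw [PySem.List.pyRange_one_cons hab]
      simp only [List.foldl_cons, List.map_cons]
      have hw : whileA items a (items.length - j) j = fge items a 0 := by
        rw [lockstep items a (items.length - j) j (le_refl _) hH]
        exact fge_eq_zero items a j hj hH
      obtain ⟨b1, b2, b3, b4⟩ := fge_props items a items.length 0 (by omega) (by omega)
      have := ih (a + 1) (fge items a 0) (ans ++ [((fge items a 0 : Nat) : Int)])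
        (by omega) b2
        (fun k hk => lt_trans (b3 k (by omega) hk) (by omega))
      simp only [stepA, hw]
      rw [this, List.append_assoc]
      rfl
    · rw [PySem.List.pyRange_one_eq_nil (by omega)]
      simp

-- ===== VERDICT (by name: the statement is the Claim_ definition above) =====
theorem count_prefix_sums_spec : Claim_equal_count_prefix_sums := by
  intro count items _
  unfold Spec_count_prefix_sums count_prefix_sums count_prefix_sums_alt
  rw [foldA items count ((count - 0).toNat) 0 0 [] (le_refl _) (by omega) (by omega)]
  simp only [List.nil_append]
  apply List.map_congr_left
  intro i hi
  congr 1
  rw [pmaxB_length items none]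
  exact (bsearch_correct items i items.length 0 items.length (by omega) (by omega)
    (fge_props items i items.length 0 (by omega) (by omega)).2.1 (le_refl _)).symm
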